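-- pv_equiv track=rewrite | github.com/zateckar/notepadPlus | tools/generate_lexer_code.py | generate_file_filters
-- ===== SOURCE A (Python) =====
-- from typing import Dict, List, Optional, Tuple, Any
--
-- def generate_file_filters(language_map: Dict[str, str]) -> str:
--     """Generate comprehensive file filter string."""
--     lines = []
--
--     # Base filters
--     filters = [
--         "All Files\\0*.*\\0",
--         "Text Files\\0*.txt\\0",
--     ]
--
--     # Group languages by category (simplified)
--     categories = {
--         "Programming": [],
--         "Web": [],
--         "Scripting": [],
--         "Data": [],
--         "Config": [],
--         "Other": []
--     }
--
--     # Simple categorization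
--     for linguist_name, lexer_name in language_map.items():
--         if linguist_name in ["C", "C++", "Rust", "Go", "Java", "C#", "Kotlin", "Swift"]:
--             categories["Programming"].append((linguist_name, lexer_name))
--         elif linguist_name in ["HTML", "CSS", "JavaScript", "TypeScript", "XML", "JSON"]:
--             categories["Web"].append((linguist_name, lexer_name))
--         elif linguist_name in ["Python", "Ruby", "Perl", "Lua", "Shell", "PowerShell"]:
--             categories["Scripting"].append((linguist_name, lexer_name))
--         elif linguist_name in ["YAML", "TOML", "CSV", "SQL"]:
--             categories["Data"].append((linguist_name, lexer_name))
--         elif linguist_name in ["Makefile", "CMake", "Dockerfile"]: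
--             categories["Config"].append((linguist_name, lexer_name))
--         else:
--             categories["Other"].append((linguist_name, lexer_name))
--
--     # Generate filter strings for each category
--     for category, languages in categories.items():
--         if not languages:
--             continue
--
--         filter_name = f"{category} Files\\0"
--         extensions = []
--
--         for linguist_name, lexer_name in languages:
--             # Get extensions for this language from linguist data
--             # This is simplified - in production you'd look up the actual extensions
--             if linguist_name == "C":
--                 extensions.extend(["*.c", "*.h"])
--             elif linguist_name == "C++":
--                 extensions.extend(["*.cpp", "*.hpp", "*.cc", "*.cxx"])
--             elif linguist_name == "Python":
--                 extensions.extend(["*.py", "*.pyw", "*.pyi"])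
--             elif linguist_name == "JavaScript":
--                 extensions.extend(["*.js", "*.mjs"])
--             elif linguist_name == "HTML":
--                 extensions.extend(["*.html", "*.htm"])
--             elif linguist_name == "CSS":
--                 extensions.extend(["*.css"])
--             elif linguist_name == "XML":
--                 extensions.extend(["*.xml"])
--             elif linguist_name == "JSON":
--                 extensions.extend(["*.json"])
--             # Add more as needed...
--
--         if extensions:
--             filter_name += ";".join(extensions) + "\\0"
--             filters.append(filter_name)
--
--     # Generate the static string
--     lines.append("/* Comprehensive file filter string for save dialogs */")
--     lines.append("const char* g_fileFilters =")
--     filter_string = "".join(filters)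
--     # Escape quotes and format for C string
--     filter_string = filter_string.replace("\\", "\\\\").replace('"', '\\"')
--     lines.append(f'    "{filter_string}";')
--     lines.append("")
--
--     return "\n".join(lines)
-- ===== SOURCE B (Python) =====
-- # Different algorithm: A partitions every language into six category lists and
-- # then re-scans each list with a second if/elif chain for extensions.  B never
-- # categorizes at all: only the eight languages in EXT can contribute
-- # extensions, and they fall into just three categories, so Data/Config/Other
-- # filters can never appear in the output.  B therefore loops over a constant
-- # three-row (category, languages) table and, per row, takes the extensions of
-- # the map's keys restricted to that row's languages (key order preserved).
--
-- EXT = {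
--     "C": ["*.c", "*.h"],
--     "C++": ["*.cpp", "*.hpp", "*.cc", "*.cxx"],
--     "Python": ["*.py", "*.pyw", "*.pyi"],
--     "JavaScript": ["*.js", "*.mjs"],
--     "HTML": ["*.html", "*.htm"],
--     "CSS": ["*.css"],
--     "XML": ["*.xml"],
--     "JSON": ["*.json"],
-- }
--
-- CAT_LANGS = [
--     ("Programming", ("C", "C++")),
--     ("Web", ("HTML", "CSS", "JavaScript", "XML", "JSON")),
--     ("Scripting", ("Python",)),
-- ]
--
--
-- def generate_file_filters(language_map):
--     """Generate comprehensive file filter string."""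
--     names = list(language_map)
--     filters = ["All Files\\0*.*\\0", "Text Files\\0*.txt\\0"]
--     for cat, langs in CAT_LANGS:
--         exts = [e for n in names if n in langs for e in EXT[n]]
--         if exts:
--             filters.append(cat + " Files\\0" + ";".join(exts) + "\\0")
--     body = "".join(filters).replace("\\", "\\\\").replace('"', '\\"')
--     return "\n".join([
--         "/* Comprehensive file filter string for save dialogs */",
--         "const char* g_fileFilters =",
--         '    "' + body + '";',
--         "",
--     ])
-- ===== Notes on version B (the rewrite author's own statement) =====
-- stated objective: simpler
-- what changed: B deletes A's partition-into-six-categories pass and its second per-category if/elif extension scan: since only the eight languages with extension entries can produce a filter and they span only three categories, B loops over a constant three-row (category, languages) table and builds each filter by one filtered comprehension over the key list; Data/Config/Other are provably never emitted.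
import Mathlib
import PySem

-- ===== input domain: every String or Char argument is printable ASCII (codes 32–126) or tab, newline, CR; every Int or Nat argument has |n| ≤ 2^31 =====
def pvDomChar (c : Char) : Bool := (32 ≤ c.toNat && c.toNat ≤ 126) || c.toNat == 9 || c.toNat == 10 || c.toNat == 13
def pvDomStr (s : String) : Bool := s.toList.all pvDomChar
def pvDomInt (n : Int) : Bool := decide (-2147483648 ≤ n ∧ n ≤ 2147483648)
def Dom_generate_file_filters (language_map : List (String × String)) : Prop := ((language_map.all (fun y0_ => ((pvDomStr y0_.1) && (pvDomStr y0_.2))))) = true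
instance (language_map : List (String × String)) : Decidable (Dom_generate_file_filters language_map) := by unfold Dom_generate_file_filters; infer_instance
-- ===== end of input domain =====

-- B drops A's six-way categorization pass and second per-category extension scan:
-- only eight languages carry extensions, spanning three categories, so B loops over
-- a constant three-row table filtering the key list; objective: simpler.

-- ===== PORT A =====

-- categories accumulator: the six lists of A's `categories` dict, fixed keys
structure ACats where
  prog : List (String × String)
  web : List (String × String)
  scr : List (String × String)
  dat : List (String × String)
  cfg : List (String × String)
  oth : List (String × String)
deriving Repr, DecidableEq

-- the first if/elif chain of A (categorization)
def aCategorize (c : ACats) (p : String × String) : ACats :=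
  if p.1 ∈ ["C", "C++", "Rust", "Go", "Java", "C#", "Kotlin", "Swift"] then
    { c with prog := c.prog ++ [p] }
  else if p.1 ∈ ["HTML", "CSS", "JavaScript", "TypeScript", "XML", "JSON"] then
    { c with web := c.web ++ [p] }
  else if p.1 ∈ ["Python", "Ruby", "Perl", "Lua", "Shell", "PowerShell"] then
    { c with scr := c.scr ++ [p] }
  else if p.1 ∈ ["YAML", "TOML", "CSV", "SQL"] then
    { c with dat := c.dat ++ [p] }
  else if p.1 ∈ ["Makefile", "CMake", "Dockerfile"] then
    { c with cfg := c.cfg ++ [p] }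
  else
    { c with oth := c.oth ++ [p] }

-- the second if/elif chain of A (extensions.extend(...))
def aExtend (e : List String) (p : String × String) : List String :=
  if p.1 = "C" then e ++ ["*.c", "*.h"]
  else if p.1 = "C++" then e ++ ["*.cpp", "*.hpp", "*.cc", "*.cxx"]
  else if p.1 = "Python" then e ++ ["*.py", "*.pyw", "*.pyi"]
  else if p.1 = "JavaScript" then e ++ ["*.js", "*.mjs"]
  else if p.1 = "HTML" then e ++ ["*.html", "*.htm"]
  else if p.1 = "CSS" then e ++ ["*.css"]
  else if p.1 = "XML" then e ++ ["*.xml"]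
  else if p.1 = "JSON" then e ++ ["*.json"]
  else e

-- one iteration of A's `for category, languages in categories.items()` loop body
def aCatBlock (filters : List String) (category : String)
    (languages : List (String × String)) : List String :=
  if languages = [] then filters
  else
    let extensions := languages.foldl aExtend []
    if extensions = [] then filters
    else filters ++ [category ++ " Files\\0" ++ PySem.Str.join ";" extensions ++ "\\0"]

def generate_file_filters (language_map : List (String × String)) : String :=
  let items := (PySem.Dict.ofList language_map).items
  let cats := items.foldl aCategorize ⟨[], [], [], [], [], []⟩
  let filters : List String := ["All Files\\0*.*\\0", "Text Files\\0*.txt\\0"]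
  let filters := aCatBlock filters "Programming" cats.prog
  let filters := aCatBlock filters "Web" cats.web
  let filters := aCatBlock filters "Scripting" cats.scr
  let filters := aCatBlock filters "Data" cats.dat
  let filters := aCatBlock filters "Config" cats.cfg
  let filters := aCatBlock filters "Other" cats.oth
  let filter_string := PySem.Str.join "" filters
  let filter_string := PySem.Str.replace (PySem.Str.replace filter_string "\\" "\\\\") "\"" "\\\""
  PySem.Str.join "\n"
    ["/* Comprehensive file filter string for save dialogs */",
     "const char* g_fileFilters =",
     "    \"" ++ filter_string ++ "\";",
     ""]

-- ===== PORT B =====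

def EXT : PySem.Dict String (List String) := PySem.Dict.ofList
  [("C", ["*.c", "*.h"]),
   ("C++", ["*.cpp", "*.hpp", "*.cc", "*.cxx"]),
   ("Python", ["*.py", "*.pyw", "*.pyi"]),
   ("JavaScript", ["*.js", "*.mjs"]),
   ("HTML", ["*.html", "*.htm"]),
   ("CSS", ["*.css"]),
   ("XML", ["*.xml"]),
   ("JSON", ["*.json"])]

def CAT_LANGS : List (String × List String) :=
  [("Programming", ["C", "C++"]),
   ("Web", ["HTML", "CSS", "JavaScript", "XML", "JSON"]),
   ("Scripting", ["Python"])]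

def generate_file_filters_alt (language_map : List (String × String)) : String :=
  let names := (PySem.Dict.ofList language_map).keys
  let filters : List String := ["All Files\\0*.*\\0", "Text Files\\0*.txt\\0"]
  -- `[e for n in names if n in langs for e in EXT[n]]`; EXT[n] is guarded by the
  -- membership test (langs ⊆ EXT's keys), so getD is exact here
  let filters := CAT_LANGS.foldl (fun fs cl =>
    let exts := names.flatMap (fun n => if n ∈ cl.2 then EXT.getD n [] else [])
    if exts = [] then fs
    else fs ++ [cl.1 ++ " Files\\0" ++ PySem.Str.join ";" exts ++ "\\0"]) filters
  let body := PySem.Str.replace (PySem.Str.replace (PySem.Str.join "" filters) "\\" "\\\\") "\"" "\\\""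
  PySem.Str.join "\n"
    ["/* Comprehensive file filter string for save dialogs */",
     "const char* g_fileFilters =",
     "    \"" ++ body ++ "\";",
     ""]

-- ===== PRECONDITION & SPEC =====
def Spec_generate_file_filters (language_map : List (String × String)) (out : String) : Prop := out = generate_file_filters_alt language_map
instance (language_map : List (String × String)) (out : String) : Decidable (Spec_generate_file_filters language_map out) := by unfold Spec_generate_file_filters; infer_instance

-- ===== CLAIM =====
def Claim_equal_generate_file_filters : Prop := ∀ (language_map : List (String × String)), Dom_generate_file_filters language_map → Spec_generate_file_filters language_map (generate_file_filters language_map)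

-- ===== LEMMAS AND PROOFS =====

-- the category A's first chain assigns to a name
def catA (s : String) : String :=
  if s ∈ ["C", "C++", "Rust", "Go", "Java", "C#", "Kotlin", "Swift"] then "Programming"
  else if s ∈ ["HTML", "CSS", "JavaScript", "TypeScript", "XML", "JSON"] then "Web"
  else if s ∈ ["Python", "Ruby", "Perl", "Lua", "Shell", "PowerShell"] then "Scripting"
  else if s ∈ ["YAML", "TOML", "CSV", "SQL"] then "Data"
  else if s ∈ ["Makefile", "CMake", "Dockerfile"] then "Config"
  else "Other"

-- the extensions A's second chain appends for a name
def extA (s : String) : List String :=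
  if s = "C" then ["*.c", "*.h"]
  else if s = "C++" then ["*.cpp", "*.hpp", "*.cc", "*.cxx"]
  else if s = "Python" then ["*.py", "*.pyw", "*.pyi"]
  else if s = "JavaScript" then ["*.js", "*.mjs"]
  else if s = "HTML" then ["*.html", "*.htm"]
  else if s = "CSS" then ["*.css"]
  else if s = "XML" then ["*.xml"]
  else if s = "JSON" then ["*.json"]
  else []

theorem EXT_mk : EXT = PySem.Dict.mk [("C", ["*.c", "*.h"]), ("C++", ["*.cpp", "*.hpp", "*.cc", "*.cxx"]), ("Python", ["*.py", "*.pyw", "*.pyi"]), ("JavaScript", ["*.js", "*.mjs"]), ("HTML", ["*.html", "*.htm"]), ("CSS", ["*.css"]), ("XML", ["*.xml"]), ("JSON", ["*.json"])] := by rfl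

theorem extA_eq (s : String) : EXT.getD s [] = extA s := by
  rw [EXT_mk]
  by_cases h1 : s = "C"
  · subst h1; rfl
  by_cases h2 : s = "C++"
  · subst h2; rfl
  by_cases h3 : s = "Python"
  · subst h3; rfl
  by_cases h4 : s = "JavaScript"
  · subst h4; rfl
  by_cases h5 : s = "HTML"
  · subst h5; rfl
  by_cases h6 : s = "CSS"
  · subst h6; rfl
  by_cases h7 : s = "XML"
  · subst h7; rfl
  by_cases h8 : s = "JSON"
  · subst h8; rfl
  simp [extA, PySem.Dict.getD_eq_get?_getD, PySem.Dict.get?, beq_iff_eq,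
    Ne.symm h1, Ne.symm h2, Ne.symm h3, Ne.symm h4, Ne.symm h5, Ne.symm h6, Ne.symm h7, Ne.symm h8, h1, h2, h3, h4, h5, h6, h7, h8]

theorem aExtend_eq (e : List String) (p : String × String) :
    aExtend e p = e ++ extA p.1 := by
  unfold aExtend extA
  split_ifs <;> simp

theorem foldl_aExtend (l : List (String × String)) (e : List String) :
    l.foldl aExtend e = e ++ l.flatMap (fun p => extA p.1) := by
  induction l generalizing e with
  | nil => simp
  | cons p t ih => simp [aExtend_eq, ih, List.append_assoc]

-- A's per-category entry (what aCatBlock appends)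
def entryOf (cat : String) (exts : List String) : List String :=
  if exts = [] then []
  else [cat ++ " Files\\0" ++ PySem.Str.join ";" exts ++ "\\0"]

theorem aCatBlock_eq (f : List String) (cat : String) (langs : List (String × String)) :
    aCatBlock f cat langs = f ++ entryOf cat (langs.flatMap (fun p => extA p.1)) := by
  unfold aCatBlock entryOf
  rcases eq_or_ne langs [] with h | h
  · subst h; simp
  · simp only [h, foldl_aExtend, List.nil_append]
    split_ifs <;> simp_all

-- aCategorize appends to the single field named by catA
theorem aCategorize_eq (c : ACats) (p : String × String) :
    aCategorize c p =
      ⟨c.prog ++ (if catA p.1 = "Programming" then [p] else []),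
       c.web ++ (if catA p.1 = "Web" then [p] else []),
       c.scr ++ (if catA p.1 = "Scripting" then [p] else []),
       c.dat ++ (if catA p.1 = "Data" then [p] else []),
       c.cfg ++ (if catA p.1 = "Config" then [p] else []),
       c.oth ++ (if catA p.1 = "Other" then [p] else [])⟩ := by
  by_cases hp : p.1 ∈ ["C", "C++", "Rust", "Go", "Java", "C#", "Kotlin", "Swift"]
  · have hc : catA p.1 = "Programming" := by unfold catA; rw [if_pos hp]
    simp [aCategorize, hp, hc]
  by_cases hw : p.1 ∈ ["HTML", "CSS", "JavaScript", "TypeScript", "XML", "JSON"]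
  · have hc : catA p.1 = "Web" := by unfold catA; rw [if_neg hp, if_pos hw]
    simp [aCategorize, hp, hw, hc]
  by_cases hs : p.1 ∈ ["Python", "Ruby", "Perl", "Lua", "Shell", "PowerShell"]
  · have hc : catA p.1 = "Scripting" := by unfold catA; rw [if_neg hp, if_neg hw, if_pos hs]
    simp [aCategorize, hp, hw, hs, hc]
  by_cases hd : p.1 ∈ ["YAML", "TOML", "CSV", "SQL"]
  · have hc : catA p.1 = "Data" := by unfold catA; rw [if_neg hp, if_neg hw, if_neg hs, if_pos hd]
    simp [aCategorize, hp, hw, hs, hd, hc]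
  by_cases hf : p.1 ∈ ["Makefile", "CMake", "Dockerfile"]
  · have hc : catA p.1 = "Config" := by
      unfold catA; rw [if_neg hp, if_neg hw, if_neg hs, if_neg hd, if_pos hf]
    simp [aCategorize, hp, hw, hs, hd, hf, hc]
  · have hc : catA p.1 = "Other" := by
      unfold catA; rw [if_neg hp, if_neg hw, if_neg hs, if_neg hd, if_neg hf]
    simp [aCategorize, hp, hw, hs, hd, hf, hc]

-- (if b then [p] else []) ++ f = the filter_cons shape
theorem ite_singleton_append {α : Type} (b : Prop) [Decidable b] (p : α) (f : List α) :
    (if b then [p] else []) ++ f = if b then p :: f else f := by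
  split <;> simp

theorem fold_cat (l : List (String × String)) (c : ACats) :
    l.foldl aCategorize c =
      ⟨c.prog ++ l.filter (fun p => catA p.1 = "Programming"),
       c.web ++ l.filter (fun p => catA p.1 = "Web"),
       c.scr ++ l.filter (fun p => catA p.1 = "Scripting"),
       c.dat ++ l.filter (fun p => catA p.1 = "Data"),
       c.cfg ++ l.filter (fun p => catA p.1 = "Config"),
       c.oth ++ l.filter (fun p => catA p.1 = "Other")⟩ := by
  induction l generalizing c with
  | nil => simp
  | cons p t ih =>
    rw [List.foldl_cons, aCategorize_eq, ih]
    simp only [List.filter_cons, List.append_assoc, ite_singleton_append, decide_eq_true_eq]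

-- filter-then-flatMap as one flatMap with an if
theorem flatMap_filter {α : Type} (q : α → Bool) (f : α → List String) (l : List α) :
    (l.filter q).flatMap f = l.flatMap (fun x => if q x then f x else []) := by
  induction l with
  | nil => rfl
  | cons x t ih =>
    by_cases h : q x <;> simp [h, ih]

-- extA vanishes off the eight extension-bearing languages
theorem extA_of_ne (s : String) (h1 : s ≠ "C") (h2 : s ≠ "C++") (h3 : s ≠ "Python")
    (h4 : s ≠ "JavaScript") (h5 : s ≠ "HTML") (h6 : s ≠ "CSS") (h7 : s ≠ "XML")
    (h8 : s ≠ "JSON") : extA s = [] := by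
  simp only [extA, if_neg h1, if_neg h2, if_neg h3, if_neg h4, if_neg h5, if_neg h6,
    if_neg h7, if_neg h8]

-- pointwise: A's category-restricted extensions vs B's table-restricted lookups
theorem ext_prog (s : String) :
    (if catA s = "Programming" then extA s else []) =
    (if s ∈ ["C", "C++"] then EXT.getD s [] else []) := by
  by_cases h1 : s = "C"
  · subst h1; decide
  by_cases h2 : s = "C++"
  · subst h2; decide
  by_cases h3 : s = "Python"
  · subst h3; decide
  by_cases h4 : s = "JavaScript"
  · subst h4; decide
  by_cases h5 : s = "HTML"
  · subst h5; decide
  by_cases h6 : s = "CSS"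
  · subst h6; decide
  by_cases h7 : s = "XML"
  · subst h7; decide
  by_cases h8 : s = "JSON"
  · subst h8; decide
  have hz := extA_of_ne s h1 h2 h3 h4 h5 h6 h7 h8
  rw [extA_eq]
  simp [hz]

theorem ext_web (s : String) :
    (if catA s = "Web" then extA s else []) =
    (if s ∈ ["HTML", "CSS", "JavaScript", "XML", "JSON"] then EXT.getD s [] else []) := by
  by_cases h1 : s = "C"
  · subst h1; decide
  by_cases h2 : s = "C++"
  · subst h2; decide
  by_cases h3 : s = "Python"
  · subst h3; decide
  by_cases h4 : s = "JavaScript"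
  · subst h4; decide
  by_cases h5 : s = "HTML"
  · subst h5; decide
  by_cases h6 : s = "CSS"
  · subst h6; decide
  by_cases h7 : s = "XML"
  · subst h7; decide
  by_cases h8 : s = "JSON"
  · subst h8; decide
  have hz := extA_of_ne s h1 h2 h3 h4 h5 h6 h7 h8
  rw [extA_eq]
  simp [hz]

theorem ext_scr (s : String) :
    (if catA s = "Scripting" then extA s else []) =
    (if s ∈ ["Python"] then EXT.getD s [] else []) := by
  by_cases h1 : s = "C"
  · subst h1; decide
  by_cases h2 : s = "C++"
  · subst h2; decide
  by_cases h3 : s = "Python"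
  · subst h3; decide
  by_cases h4 : s = "JavaScript"
  · subst h4; decide
  by_cases h5 : s = "HTML"
  · subst h5; decide
  by_cases h6 : s = "CSS"
  · subst h6; decide
  by_cases h7 : s = "XML"
  · subst h7; decide
  by_cases h8 : s = "JSON"
  · subst h8; decide
  have hz := extA_of_ne s h1 h2 h3 h4 h5 h6 h7 h8
  rw [extA_eq]
  simp [hz]

-- Data/Config/Other categories never accumulate any extensions
theorem ext_none (s : String) (cat : String)
    (hcat : cat = "Data" ∨ cat = "Config" ∨ cat = "Other") :
    (if catA s = cat then extA s else []) = [] := by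
  by_cases h1 : s = "C"
  · subst h1; rcases hcat with rfl | rfl | rfl <;> decide
  by_cases h2 : s = "C++"
  · subst h2; rcases hcat with rfl | rfl | rfl <;> decide
  by_cases h3 : s = "Python"
  · subst h3; rcases hcat with rfl | rfl | rfl <;> decide
  by_cases h4 : s = "JavaScript"
  · subst h4; rcases hcat with rfl | rfl | rfl <;> decide
  by_cases h5 : s = "HTML"
  · subst h5; rcases hcat with rfl | rfl | rfl <;> decide
  by_cases h6 : s = "CSS"
  · subst h6; rcases hcat with rfl | rfl | rfl <;> decide
  by_cases h7 : s = "XML"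
  · subst h7; rcases hcat with rfl | rfl | rfl <;> decide
  by_cases h8 : s = "JSON"
  · subst h8; rcases hcat with rfl | rfl | rfl <;> decide
  have hz := extA_of_ne s h1 h2 h3 h4 h5 h6 h7 h8
  simp [hz]

-- pull B's conditional append out of the foldl step
theorem b_foldl_entry (names : List String) (rows : List (String × List String))
    (fs : List String) :
    rows.foldl (fun fs cl =>
      let exts := names.flatMap (fun n => if n ∈ cl.2 then EXT.getD n [] else [])
      if exts = [] then fs
      else fs ++ [cl.1 ++ " Files\\0" ++ PySem.Str.join ";" exts ++ "\\0"]) fs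
    = fs ++ rows.flatMap (fun cl =>
        entryOf cl.1 (names.flatMap (fun n => if n ∈ cl.2 then EXT.getD n [] else []))) := by
  induction rows generalizing fs with
  | nil => simp
  | cons r t ih =>
    rw [List.foldl_cons, ih]
    simp only [entryOf, List.flatMap_cons]
    split_ifs <;> simp_all

-- A's category extensions, rewritten to B's shape over the key list
theorem exts_cat_eq (items : List (String × String)) (cat : String)
    (langs : List String)
    (hpt : ∀ s, (if catA s = cat then extA s else []) =
                (if s ∈ langs then EXT.getD s [] else [])) :
    (items.filter (fun p => catA p.1 = cat)).flatMap (fun p => extA p.1)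
    = (items.map (fun p => p.1)).flatMap (fun n => if n ∈ langs then EXT.getD n [] else []) := by
  rw [flatMap_filter (fun p => decide (catA p.1 = cat)) (fun p => extA p.1) items,
    List.flatMap_map]
  refine List.flatMap_congr (fun p _ => ?_)
  simpa using hpt p.1

-- ===== VERDICT =====
theorem generate_file_filters_spec : Claim_equal_generate_file_filters := by
  intro lm _
  simp only [Spec_generate_file_filters, generate_file_filters, generate_file_filters_alt]
  rw [fold_cat]
  simp only [List.nil_append]
  rw [aCatBlock_eq, aCatBlock_eq, aCatBlock_eq, aCatBlock_eq, aCatBlock_eq, aCatBlock_eq]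
  rw [exts_cat_eq _ _ _ ext_prog, exts_cat_eq _ _ _ ext_web, exts_cat_eq _ _ _ ext_scr]
  rw [show ∀ items : List (String × String),
      (items.filter (fun p => catA p.1 = "Data")).flatMap (fun p => extA p.1) = []
    from fun items => by
      rw [flatMap_filter]
      simp [fun p : String × String => ext_none p.1 "Data" (Or.inl rfl)]]
  rw [show ∀ items : List (String × String),
      (items.filter (fun p => catA p.1 = "Config")).flatMap (fun p => extA p.1) = []
    from fun items => by
      rw [flatMap_filter]
      simp [fun p : String × String => ext_none p.1 "Config" (Or.inr (Or.inl rfl))]]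
  rw [show ∀ items : List (String × String),
      (items.filter (fun p => catA p.1 = "Other")).flatMap (fun p => extA p.1) = []
    from fun items => by
      rw [flatMap_filter]
      simp [fun p : String × String => ext_none p.1 "Other" (Or.inr (Or.inr rfl))]]
  rw [b_foldl_entry]
  simp [CAT_LANGS, entryOf, PySem.Dict.keys, List.append_assoc, List.mem_cons,
    List.not_mem_nil]
  rfl
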